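-- pv_equiv track=rewrite | github.com/MrBrantCode/unitest_baseline | mut_generate/mist_train_cf/cf_19849/solution.py | expand_strings
-- ===== SOURCE A (Python) =====
-- def expand_strings(strings):
--     expanded_strings = []
--
--     for string in strings:
--         if any(char.isdigit() or not char.isalnum() for char in string):
--             continue
--
--         vowels = set(char.lower() for char in string if char.lower() in 'aeiou')
--         if len(vowels) == 0:
--             continue
--
--         expanded_strings.append((string, vowels))
--
--     expanded_strings.sort(key=lambda x: len(x[1]), reverse=True)
--     return expanded_strings
-- ===== SOURCE B (Python) =====
-- def _classify(string):
--     if not all(char.isalnum() and not char.isdigit() for char in string):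
--         return None
--     vowels = set()
--     for char in string:
--         low = char.lower()
--         if low in 'aeiou':
--             vowels.add(low)
--     if not vowels:
--         return None
--     return (string, vowels)
--
--
-- def expand_strings(strings):
--     buckets = [[], [], [], [], [], []]
--     for string in strings:
--         entry = _classify(string)
--         if entry is not None:
--             buckets[len(entry[1])].append(entry)
--     result = []
--     for bucket in reversed(buckets):
--         result += bucket
--     return result
-- ===== Notes on version B (the rewrite author's own statement) =====
-- stated objective: alternative
-- what changed: B keeps the same per-string filtering/vowel-set pass (factored into a _classify helper) but replaces A's collect-then-stable-sort (key=len(vowels), reverse=True) by a counting/bucket sort: surviving entries are appended to buckets[len(vowels)] (len is always 1..5) during the single pass and the result is the concatenation of buckets 5 down to 1, which reproduces the stable descending order exactly.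
import Mathlib
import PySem

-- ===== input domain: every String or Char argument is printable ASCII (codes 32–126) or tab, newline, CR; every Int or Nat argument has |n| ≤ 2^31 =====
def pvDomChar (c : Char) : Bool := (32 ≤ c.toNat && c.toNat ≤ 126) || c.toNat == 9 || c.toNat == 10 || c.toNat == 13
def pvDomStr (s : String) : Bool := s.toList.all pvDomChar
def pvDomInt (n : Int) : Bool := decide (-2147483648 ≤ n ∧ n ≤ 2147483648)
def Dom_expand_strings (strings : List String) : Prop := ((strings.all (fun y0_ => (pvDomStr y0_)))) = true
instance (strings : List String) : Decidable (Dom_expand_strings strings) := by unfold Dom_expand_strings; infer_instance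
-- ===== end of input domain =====

-- B replaces A's comparison sort by a counting/bucket pass over the bounded vowel-set size (1..5); same return value, different algorithm.


-- ===== PORT A =====
def expand_strings (strings : List String) : List (String × List String) :=
  PySem.List.sorted
    (strings.foldl (fun acc string =>
      if string.toList.any (fun char => PySem.Chars.isdigit char || !PySem.Chars.isalnum char) then
        acc
      else
        let vowels : PySem.Set String :=
          PySem.Set.ofList (((string.toList.filter
              (fun char => PySem.Chars.isIn (PySem.Chars.lower [char]) ['a','e','i','o','u'])).map
            (fun char => String.mk (PySem.Chars.lower [char]))))
        if vowels.length = 0 then acc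
        else acc ++ [(string, vowels)]) [])
    (fun x => x.2.length) true

-- ===== PORT B =====
def pvClassify (string : String) : Option (String × List String) :=
  if !(string.toList.all (fun char => PySem.Chars.isalnum char && !PySem.Chars.isdigit char)) then
    none
  else
    let vowels : PySem.Set String := string.toList.foldl (fun vs char =>
      let low := PySem.Chars.lower [char]
      if PySem.Chars.isIn low ['a','e','i','o','u'] then PySem.Set.add vs (String.mk low)
      else vs) PySem.Set.empty
    if vowels.length = 0 then none else some (string, vowels)

def expand_strings_alt (strings : List String) : List (String × List String) :=
  (strings.foldl (fun bks string =>
      match pvClassify string with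
      | none => bks
      | some entry => bks.set entry.2.length (bks.getD entry.2.length [] ++ [entry]))
    [[], [], [], [], [], []]).reverse.foldl (fun res bucket => res ++ bucket) []

-- ===== PRECONDITION & SPEC =====
def Spec_expand_strings (strings : List String) (out : List (String × List String)) : Prop := out = expand_strings_alt strings
instance (strings : List String) (out : List (String × List String)) : Decidable (Spec_expand_strings strings out) := by unfold Spec_expand_strings; infer_instance

-- ===== CLAIM (what is proved, stated in full; the proofs are below) =====
def Claim_equal_expand_strings : Prop := ∀ (strings : List String), Dom_expand_strings strings → Spec_expand_strings strings (expand_strings strings)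

-- ===== LEMMAS AND PROOFS =====

-- the entries both loops keep, in encounter order
def pvEntries (strings : List String) : List (String × List String) := strings.filterMap pvClassify

-- bucket k: the kept entries whose vowel set has exactly k elements, in order
def pvG (k : Nat) (es : List (String × List String)) : List (String × List String) :=
  es.filter (fun t => t.2.length == k)

theorem pvCondAdd (l : List Char) (vs : PySem.Set String) :
    l.foldl (fun vs char =>
      let low := PySem.Chars.lower [char]
      if PySem.Chars.isIn low ['a','e','i','o','u'] then PySem.Set.add vs (String.mk low)
      else vs) vs
    = List.foldl PySem.Set.add vs ((l.filter
        (fun char => PySem.Chars.isIn (PySem.Chars.lower [char]) ['a','e','i','o','u'])).map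
      (fun char => String.mk (PySem.Chars.lower [char]))) := by
  induction l generalizing vs with
  | nil => rfl
  | cons c t ih =>
    by_cases hc : PySem.Chars.isIn (PySem.Chars.lower [c]) ['a','e','i','o','u'] <;>
      simp [hc, ih]

theorem pvClassify_set_eq (s : String) :
    (s.toList.foldl (fun vs char =>
      let low := PySem.Chars.lower [char]
      if PySem.Chars.isIn low ['a','e','i','o','u'] then PySem.Set.add vs (String.mk low)
      else vs) PySem.Set.empty : PySem.Set String)
    = PySem.Set.ofList (((s.toList.filter
        (fun char => PySem.Chars.isIn (PySem.Chars.lower [char]) ['a','e','i','o','u'])).map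
      (fun char => String.mk (PySem.Chars.lower [char])))) := by
  rw [PySem.Set.ofList_eq_foldl]
  exact pvCondAdd s.toList PySem.Set.empty

theorem pvBody_eq (s : String)
    (acc : List (String × List String)) :
    (if s.toList.any (fun char => PySem.Chars.isdigit char || !PySem.Chars.isalnum char) then acc
     else
      let vowels : PySem.Set String :=
        PySem.Set.ofList (((s.toList.filter
            (fun char => PySem.Chars.isIn (PySem.Chars.lower [char]) ['a','e','i','o','u'])).map
          (fun char => String.mk (PySem.Chars.lower [char]))))
      if vowels.length = 0 then acc
      else acc ++ [(s, vowels)])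
    = match pvClassify s with | none => acc | some entry => acc ++ [entry] := by
  unfold pvClassify
  rw [pvClassify_set_eq]
  have hb : (s.toList.any (fun char => PySem.Chars.isdigit char || !PySem.Chars.isalnum char))
      = !(s.toList.all (fun char => PySem.Chars.isalnum char && !PySem.Chars.isdigit char)) := by
    induction s.toList with
    | nil => rfl
    | cons c t ih =>
      simp only [List.any_cons, List.all_cons, ih]
      cases PySem.Chars.isdigit c <;> cases PySem.Chars.isalnum c <;> rfl
  rw [hb]
  cases h : (s.toList.all (fun char => PySem.Chars.isalnum char && !PySem.Chars.isdigit char)) with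
  | false => simp
  | true =>
    simp only [Bool.not_true, Bool.false_eq_true, ite_false]
    split <;> simp_all

theorem pvMem_vowels (s : String) (t : String × List String) (h : pvClassify s = some t) :
    1 ≤ t.2.length ∧ t.2.length ≤ 5 := by
  simp only [pvClassify] at h
  rw [pvClassify_set_eq] at h
  split at h
  · exact absurd h (by simp)
  · split at h
    · exact absurd h (by simp)
    · rename_i hlen
      obtain rfl : (s, _) = t := Option.some.inj h
      refine ⟨Nat.pos_of_ne_zero hlen, ?_⟩
      have hnd : (PySem.Set.ofList (((s.toList.filter
          (fun char => PySem.Chars.isIn (PySem.Chars.lower [char]) ['a','e','i','o','u'])).map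
        (fun char => String.mk (PySem.Chars.lower [char])))) : List String).Nodup :=
        PySem.Set.nodup_ofList _
      have hsub : (PySem.Set.ofList (((s.toList.filter
          (fun char => PySem.Chars.isIn (PySem.Chars.lower [char]) ['a','e','i','o','u'])).map
        (fun char => String.mk (PySem.Chars.lower [char])))) : List String)
          ⊆ ["a", "e", "i", "o", "u"] := by
        intro y hy
        rw [PySem.Set.mem_ofList] at hy
        simp only [List.mem_map, List.mem_filter] at hy
        obtain ⟨c, ⟨_, hin⟩, rfl⟩ := hy
        have hinf : PySem.Chars.lower [c] <:+: ['a','e','i','o','u'] :=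
          (PySem.Chars.isIn_iff_infix _ _).mp hin
        have hl : PySem.Chars.lower [c] = [PySem.Chars.lowerChar c] := rfl
        rw [hl] at hinf ⊢
        have hmem : PySem.Chars.lowerChar c ∈ ['a','e','i','o','u'] :=
          hinf.subset (by simp)
        simp only [List.mem_cons, List.not_mem_nil, or_false] at hmem
        rcases hmem with hc | hc | hc | hc | hc <;> rw [hc] <;> decide
      calc _ ≤ (["a", "e", "i", "o", "u"] : List String).length :=
            (hnd.subperm hsub).length_le
        _ = 5 := rfl

theorem pvInsert_front {α : Type} (before : α → α → Bool) (x : α) (l : List α)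
    (h : ∀ y ∈ l, before x y = true) :
    PySem.List.insertBy before x l = x :: l := by
  cases l with
  | nil => rfl
  | cons y t => simp [PySem.List.insertBy, h y (by simp)]

theorem pvInsert_skip {α : Type} (before : α → α → Bool) (x : α) (b l : List α)
    (h : ∀ y ∈ b, before x y = false) :
    PySem.List.insertBy before x (b ++ l) = b ++ PySem.List.insertBy before x l := by
  induction b with
  | nil => rfl
  | cons y t ih =>
    simp only [List.cons_append, PySem.List.insertBy, h y (by simp)]
    simp only [Bool.false_eq_true, ite_false]
    rw [ih (fun z hz => h z (by simp [hz]))]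

theorem pvG_mem (k : Nat) (es : List (String × List String)) (y : String × List String)
    (h : y ∈ pvG k es) : y.2.length = k := by
  unfold pvG at h
  have := (List.mem_filter.mp h).2
  simpa using this

theorem pvSorted_buckets (es : List (String × List String))
    (h : ∀ t ∈ es, 1 ≤ t.2.length ∧ t.2.length ≤ 5) :
    PySem.List.sorted es (fun x => x.2.length) true
      = pvG 5 es ++ (pvG 4 es ++ (pvG 3 es ++ (pvG 2 es ++ pvG 1 es))) := by
  induction es using List.reverseRecOn with
  | nil => rfl
  | append_singleton es x ih =>
    have hx := h x (by simp)
    have hes : ∀ t ∈ es, 1 ≤ t.2.length ∧ t.2.length ≤ 5 := fun t ht => h t (by simp [ht])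
    rw [PySem.List.sorted_rev_eq_foldl_insertBy, List.foldl_append]
    simp only [List.foldl_cons, List.foldl_nil]
    rw [← PySem.List.sorted_rev_eq_foldl_insertBy, ih hes]
    set before : (String × List String) → (String × List String) → Bool :=
      fun a b => decide (b.2.length < a.2.length) with hbef
    have hG : ∀ k, pvG k (es ++ [x]) = pvG k es ++ (if x.2.length = k then [x] else []) := by
      intro k; simp [pvG, List.filter_append, List.filter_singleton]
    have hskip : ∀ k, x.2.length ≤ k → ∀ y ∈ pvG k es, before x y = false := by
      intro k hk y hy
      have := pvG_mem k es y hy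
      simp [hbef, this]; omega
    have hfront : ∀ k, k < x.2.length → ∀ y ∈ pvG k es, before x y = true := by
      intro k hk y hy
      have := pvG_mem k es y hy
      simp [hbef, this]; omega
    have h5 : x.2.length = 1 ∨ x.2.length = 2 ∨ x.2.length = 3 ∨ x.2.length = 4 ∨ x.2.length = 5 := by
      omega
    rcases h5 with hj | hj | hj | hj | hj
    · -- the new entry has 1 vowel: it goes to the very end
      simp only [hG, hj]
      norm_num
      rw [pvInsert_skip _ _ _ _ (hskip 5 (by omega)),
        pvInsert_skip _ _ _ _ (hskip 4 (by omega)),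
        pvInsert_skip _ _ _ _ (hskip 3 (by omega)),
        pvInsert_skip _ _ _ _ (hskip 2 (by omega)),
        PySem.List.insertBy_of_forall_not_before _ _ _ (hskip 1 (by omega))]
    · -- 2 vowels
      simp only [hG, hj]
      norm_num
      rw [pvInsert_skip _ _ _ _ (hskip 5 (by omega)),
        pvInsert_skip _ _ _ _ (hskip 4 (by omega)),
        pvInsert_skip _ _ _ _ (hskip 3 (by omega)),
        pvInsert_skip _ _ _ _ (hskip 2 (by omega)),
        pvInsert_front _ _ _ (fun y hy => hfront 1 (by omega) y hy)]
    · -- 3 vowels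
      have hf : ∀ y ∈ pvG 2 es ++ pvG 1 es, before x y = true := by
        intro y hy
        rcases List.mem_append.mp hy with h' | h'
        · exact hfront 2 (by omega) y h'
        · exact hfront 1 (by omega) y h'
      simp only [hG, hj]
      norm_num
      rw [pvInsert_skip _ _ _ _ (hskip 5 (by omega)),
        pvInsert_skip _ _ _ _ (hskip 4 (by omega)),
        pvInsert_skip _ _ _ _ (hskip 3 (by omega)),
        pvInsert_front _ _ _ hf]
    · -- 4 vowels
      have hf : ∀ y ∈ pvG 3 es ++ (pvG 2 es ++ pvG 1 es), before x y = true := by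
        intro y hy
        rcases List.mem_append.mp hy with h' | hy'
        · exact hfront 3 (by omega) y h'
        rcases List.mem_append.mp hy' with h' | h'
        · exact hfront 2 (by omega) y h'
        · exact hfront 1 (by omega) y h'
      simp only [hG, hj]
      norm_num
      rw [pvInsert_skip _ _ _ _ (hskip 5 (by omega)),
        pvInsert_skip _ _ _ _ (hskip 4 (by omega)),
        pvInsert_front _ _ _ hf]
    · -- 5 vowels: it goes right after the other 5-vowel entries
      have hf : ∀ y ∈ pvG 4 es ++ (pvG 3 es ++ (pvG 2 es ++ pvG 1 es)), before x y = true := by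
        intro y hy
        rcases List.mem_append.mp hy with h' | hy'
        · exact hfront 4 (by omega) y h'
        rcases List.mem_append.mp hy' with h' | hy''
        · exact hfront 3 (by omega) y h'
        rcases List.mem_append.mp hy'' with h' | h'
        · exact hfront 2 (by omega) y h'
        · exact hfront 1 (by omega) y h'
      simp only [hG, hj]
      norm_num
      rw [pvInsert_skip _ _ _ _ (hskip 5 (by omega)),
        pvInsert_front _ _ _ hf]

theorem pvBuckets (es : List (String × List String))
    (h : ∀ t ∈ es, 1 ≤ t.2.length ∧ t.2.length ≤ 5) :
    es.foldl (fun bks entry => bks.set entry.2.length (bks.getD entry.2.length [] ++ [entry]))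
      ([[], [], [], [], [], []] : List (List (String × List String)))
      = [[], pvG 1 es, pvG 2 es, pvG 3 es, pvG 4 es, pvG 5 es] := by
  induction es using List.reverseRecOn with
  | nil => rfl
  | append_singleton es x ih =>
    have hx := h x (by simp)
    have hes : ∀ t ∈ es, 1 ≤ t.2.length ∧ t.2.length ≤ 5 := fun t ht => h t (by simp [ht])
    rw [List.foldl_append]
    simp only [List.foldl_cons, List.foldl_nil]
    rw [ih hes]
    have hG : ∀ k, pvG k (es ++ [x]) = pvG k es ++ (if x.2.length = k then [x] else []) := by
      intro k; simp [pvG, List.filter_append, List.filter_singleton]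
    have h5 : x.2.length = 1 ∨ x.2.length = 2 ∨ x.2.length = 3 ∨ x.2.length = 4 ∨ x.2.length = 5 := by
      omega
    rcases h5 with hj | hj | hj | hj | hj <;>
      simp [hG, hj, List.set, List.getD]

theorem pvAfold (l : List String) (init : List (String × List String)) :
    l.foldl (fun acc string =>
      if string.toList.any (fun char => PySem.Chars.isdigit char || !PySem.Chars.isalnum char) then
        acc
      else
        let vowels : PySem.Set String :=
          PySem.Set.ofList (((string.toList.filter
              (fun char => PySem.Chars.isIn (PySem.Chars.lower [char]) ['a','e','i','o','u'])).map
            (fun char => String.mk (PySem.Chars.lower [char]))))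
        if vowels.length = 0 then acc
        else acc ++ [(string, vowels)]) init
      = init ++ l.filterMap pvClassify := by
  induction l generalizing init with
  | nil => simp
  | cons s t ih =>
    rw [List.foldl_cons, pvBody_eq s init, ih]
    cases hc : pvClassify s <;> simp [hc]

theorem pvBfold (l : List String) (init : List (List (String × List String))) :
    l.foldl (fun bks string =>
      match pvClassify string with
      | none => bks
      | some entry => bks.set entry.2.length (bks.getD entry.2.length [] ++ [entry])) init
      = (l.filterMap pvClassify).foldl
          (fun bks entry => bks.set entry.2.length (bks.getD entry.2.length [] ++ [entry])) init := by
  induction l generalizing init with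
  | nil => rfl
  | cons s t ih =>
    rw [List.foldl_cons, List.filterMap_cons]
    cases hc : pvClassify s
    · exact ih init
    · rw [List.foldl_cons]
      exact ih _

theorem pvA_eq (strings : List String) :
    expand_strings strings
      = PySem.List.sorted (pvEntries strings) (fun x => x.2.length) true := by
  unfold expand_strings pvEntries
  rw [pvAfold, List.nil_append]

theorem pvB_eq (strings : List String) :
    expand_strings_alt strings
      = pvG 5 (pvEntries strings) ++ (pvG 4 (pvEntries strings) ++ (pvG 3 (pvEntries strings)
        ++ (pvG 2 (pvEntries strings) ++ pvG 1 (pvEntries strings)))) := by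
  unfold expand_strings_alt
  rw [pvBfold]
  rw [show strings.filterMap pvClassify = pvEntries strings from rfl]
  rw [pvBuckets _ (fun t ht => by
    obtain ⟨s, _, hs⟩ := List.mem_filterMap.mp ht
    exact pvMem_vowels s t hs)]
  simp [List.append_assoc]

theorem expand_strings_eq_alt (strings : List String) :
    expand_strings strings = expand_strings_alt strings := by
  rw [pvA_eq, pvB_eq]
  exact pvSorted_buckets _ (fun t ht => by
    obtain ⟨s, _, hs⟩ := List.mem_filterMap.mp ht
    exact pvMem_vowels s t hs)

-- ===== VERDICT (by name: the statement is the Claim_ definition above) =====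
theorem expand_strings_spec : Claim_equal_expand_strings := by
  intro strings _
  unfold Spec_expand_strings
  exact expand_strings_eq_alt strings
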